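-- pv_equiv track=rewrite | github.com/ddu0422/TIL | algorithm/baekjoon/random/silver2/2304.py | calculate
-- ===== SOURCE A (Python) =====
-- def calculate(array):
--     if not array:
--         return 0
--
--     sum = 0
--     max_value = array[0][1]
--
--     for i in range(len(array) - 1):
--         sum += max_value * abs(array[i + 1][0] - array[i][0])
--         if array[i][1] < array[i + 1][1]:
--             max_value = max(max_value, array[i + 1][1])
--
--     # 기둥 배열 + 루프탑까지 면적 계산
--     return sum
-- ===== SOURCE B (Python) =====
-- def calculate(array):
--     n = len(array)
--     if n == 0:
--         return 0
--     # backward pass: suffix[i] = total horizontal distance from pillar i to the last pillar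
--     suffix = [0] * n
--     for i in range(n - 2, -1, -1):
--         suffix[i] = suffix[i + 1] + abs(array[i + 1][0] - array[i][0])
--     # Abel summation: base height covers the whole span; each new record height
--     # adds its increase times the remaining suffix distance
--     result = array[0][1] * suffix[0]
--     best = array[0][1]
--     for i in range(1, n):
--         if best < array[i][1]:
--             result += (array[i][1] - best) * suffix[i]
--             best = array[i][1]
--     return result
-- ===== Notes on version B (the rewrite author's own statement) =====
-- stated objective: alternative
-- what changed: Replaces A's forward running-max-times-gap accumulation by Abel summation (summation by parts): a backward pass builds the suffix horizontal-distance table, then the total is h0*suffix[0] plus, for each new record height, its increase times the remaining suffix distance.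
import Mathlib
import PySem

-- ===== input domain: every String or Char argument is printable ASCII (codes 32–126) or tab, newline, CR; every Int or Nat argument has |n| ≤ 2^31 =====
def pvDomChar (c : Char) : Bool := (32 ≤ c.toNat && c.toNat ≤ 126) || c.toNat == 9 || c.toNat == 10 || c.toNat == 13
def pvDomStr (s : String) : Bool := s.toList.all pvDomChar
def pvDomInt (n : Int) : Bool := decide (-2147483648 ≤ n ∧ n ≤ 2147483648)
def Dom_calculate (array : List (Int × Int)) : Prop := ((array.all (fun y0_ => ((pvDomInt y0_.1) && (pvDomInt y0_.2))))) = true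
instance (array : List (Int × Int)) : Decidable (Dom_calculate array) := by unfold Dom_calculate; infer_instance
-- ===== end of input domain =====

-- B replaces A's forward running-max*gap loop by Abel summation: a backward pass
-- builds suffix horizontal distances, then sums h0*suffix[0] plus each record
-- height increase times its remaining suffix distance; same O(n) cost.


-- ===== PORT A =====
-- A's loop over i in range(len-1): state (sum, max_value), reading array[i] and array[i+1];
-- rendered as structural recursion over adjacent pairs carrying the same state.
def calcLoopA : Int → Int → List (Int × Int) → Int
  | s, _, [] => s
  | s, _, [_] => s
  | s, maxv, (x0, h0) :: (x1, h1) :: rest =>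
      let s' := s + maxv * |x1 - x0|
      let maxv' := if h0 < h1 then max maxv h1 else maxv
      calcLoopA s' maxv' ((x1, h1) :: rest)

def calculate (array : List (Int × Int)) : Int :=
  match array with
  | [] => 0
  | (_, h0) :: _ => calcLoopA 0 h0 array

-- ===== PORT B =====
-- backward pass suffix[i] = suffix[i+1] + |x[i+1]-x[i]|, ported as structural
-- recursion from the right; returns (suffix[0], whole suffix list).
def suffListP : List (Int × Int) → Int × List Int
  | [] => (0, [])
  | [_] => (0, [0])
  | (x0, _) :: (x1, h1) :: rest =>
      let p := suffListP ((x1, h1) :: rest)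
      (p.1 + |x1 - x0|, (p.1 + |x1 - x0|) :: p.2)

-- forward loop over i = 1..n-1 on pairs (height i, suffix i), state (result, best)
def bLoop : Int → Int → List (Int × Int) → Int
  | r, _, [] => r
  | r, best, (h, sfx) :: rest =>
      if best < h then bLoop (r + (h - best) * sfx) h rest
      else bLoop r best rest

def calculate_alt (array : List (Int × Int)) : Int :=
  match array with
  | [] => 0
  | (_, h0) :: rest =>
      let p := suffListP array
      bLoop (h0 * p.1) h0 (List.zip (rest.map Prod.snd) p.2.tail)

-- ===== PRECONDITION & SPEC =====
def Spec_calculate (array : List (Int × Int)) (out : Int) : Prop := out = calculate_alt array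
instance (array : List (Int × Int)) (out : Int) : Decidable (Spec_calculate array out) := by unfold Spec_calculate; infer_instance

-- ===== CLAIM (what is proved, stated in full; the proofs are below) =====
def Claim_equal_calculate : Prop := ∀ (array : List (Int × Int)), Dom_calculate array → Spec_calculate array (calculate array)

-- ===== LEMMAS AND PROOFS =====
-- bLoop is linear in its result accumulator
theorem bLoop_shift (l : List (Int × Int)) : ∀ (a b best : Int),
    bLoop (a + b) best l = a + bLoop b best l := by
  induction l with
  | nil => intro a b best; simp [bLoop]
  | cons p l ih =>
      intro a b best
      obtain ⟨h, sfx⟩ := p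
      by_cases hc : best < h
      · simp only [bLoop, if_pos hc, add_assoc, ih]
      · simp only [bLoop, if_neg hc, ih]

-- B's suffix list on a nonempty list is its total-distance head followed by the tail's list
theorem suffListP_snd_head (l : List (Int × Int)) (p : Int × Int) :
    (suffListP (p :: l)).2 = (suffListP (p :: l)).1 :: ((suffListP (p :: l)).2).tail := by
  cases l with
  | nil => simp [suffListP]
  | cons q r => obtain ⟨x0, h0⟩ := p; obtain ⟨x1, h1⟩ := q; simp [suffListP]

-- Abel-summation invariant: A's loop from state (s, m) (with h0 ≤ m) equals
-- s + B's loop started at m * (total suffix distance).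
theorem loopA_eq_abel (rest : List (Int × Int)) :
    ∀ (x0 h0 s m : Int), h0 ≤ m →
      calcLoopA s m ((x0, h0) :: rest)
        = s + bLoop (m * (suffListP ((x0, h0) :: rest)).1) m
            (List.zip (rest.map Prod.snd) (suffListP ((x0, h0) :: rest)).2.tail) := by
  induction rest with
  | nil => intro x0 h0 s m _; simp [calcLoopA, suffListP, bLoop]
  | cons p rest ih =>
      intro x0 h0 s m hle
      obtain ⟨x1, h1⟩ := p
      have hguard : (if h0 < h1 then max m h1 else m) = max m h1 := by
        split_ifs with h
        · rfl
        · omega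
      simp only [calcLoopA, hguard, List.map_cons, suffListP, List.tail_cons]
      rw [suffListP_snd_head rest (x1, h1), List.zip_cons_cons]
      rw [ih x1 h1 (s + m * |x1 - x0|) (max m h1) (le_max_right m h1)]
      have hstep :
          bLoop (m * ((suffListP ((x1, h1) :: rest)).1 + |x1 - x0|)) m
              ((h1, (suffListP ((x1, h1) :: rest)).1)
                :: List.zip (rest.map Prod.snd) (suffListP ((x1, h1) :: rest)).2.tail)
            = m * |x1 - x0|
              + bLoop (max m h1 * (suffListP ((x1, h1) :: rest)).1) (max m h1)
                  (List.zip (rest.map Prod.snd) (suffListP ((x1, h1) :: rest)).2.tail) := by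
        set S := (suffListP ((x1, h1) :: rest)).1 with hS
        by_cases hc : m < h1
        · have hmax : max m h1 = h1 := by omega
          simp only [bLoop, if_pos hc, hmax]
          have : m * (S + |x1 - x0|) + (h1 - m) * S = m * |x1 - x0| + h1 * S := by ring
          rw [this, bLoop_shift]
        · have hmax : max m h1 = m := by omega
          simp only [bLoop, if_neg hc, hmax]
          have : m * (S + |x1 - x0|) = m * |x1 - x0| + m * S := by ring
          rw [this, bLoop_shift]
      rw [hstep]; ring

-- ===== VERDICT (by name: the statement is the Claim_ definition above) =====
theorem calculate_spec : Claim_equal_calculate := by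
  unfold Claim_equal_calculate
  intro array _
  unfold Spec_calculate calculate calculate_alt
  match array with
  | [] => rfl
  | (x0, h0) :: rest =>
      simpa using loopA_eq_abel rest x0 h0 0 h0 le_rfl
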